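-- pv_equiv track=rewrite | github.com/kevin5806/splitter | src/splitter_core.py | _generate_crop_codes
-- ===== SOURCE A (Python) =====
-- def _index_to_alpha(index):
--     letters = ""
--     value = index
--     while True:
--         value, remainder = divmod(value, 26)
--         letters = chr(65 + remainder) + letters
--         if value == 0:
--             break
--         value -= 1
--     return letters
--
-- def _generate_crop_codes(images_across, images_high, total_parts):
--     expected_parts = images_across * images_high
--     if total_parts != expected_parts:
--         return [f"P{idx + 1}" for idx in range(total_parts)]
--
--     codes = []
--     for row in range(images_high):
--         row_label = _index_to_alpha(row)
--         for col in range(images_across):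
--             codes.append(f"{row_label}{col + 1}")
--     return codes
-- ===== SOURCE B (Python) =====
-- def _index_to_alpha(index):
--     if index < 26:
--         return chr(65 + index)
--     return _index_to_alpha(index // 26 - 1) + chr(65 + index % 26)
--
--
-- def _generate_crop_codes(images_across, images_high, total_parts):
--     if total_parts != images_across * images_high:
--         return [f"P{idx + 1}" for idx in range(total_parts)]
--     codes = []
--     for idx in range(total_parts):
--         row, col = divmod(idx, images_across)
--         codes.append(f"{_index_to_alpha(row)}{col + 1}")
--     return codes
-- ===== Notes on version B (the rewrite author's own statement) =====
-- stated objective: alternative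
-- what changed: The nested row/col loops become a single flat loop over idx in range(total_parts) decoding row,col with divmod, and the iterative while-loop letter encoder becomes a direct bijective-base-26 recursion.
-- outside the precondition, e.g. on _generate_crop_codes(-2, -3, 6): A returns [], B returns ['A1', '@0', '@1', '?0', '?1', '>0']
import Mathlib
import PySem

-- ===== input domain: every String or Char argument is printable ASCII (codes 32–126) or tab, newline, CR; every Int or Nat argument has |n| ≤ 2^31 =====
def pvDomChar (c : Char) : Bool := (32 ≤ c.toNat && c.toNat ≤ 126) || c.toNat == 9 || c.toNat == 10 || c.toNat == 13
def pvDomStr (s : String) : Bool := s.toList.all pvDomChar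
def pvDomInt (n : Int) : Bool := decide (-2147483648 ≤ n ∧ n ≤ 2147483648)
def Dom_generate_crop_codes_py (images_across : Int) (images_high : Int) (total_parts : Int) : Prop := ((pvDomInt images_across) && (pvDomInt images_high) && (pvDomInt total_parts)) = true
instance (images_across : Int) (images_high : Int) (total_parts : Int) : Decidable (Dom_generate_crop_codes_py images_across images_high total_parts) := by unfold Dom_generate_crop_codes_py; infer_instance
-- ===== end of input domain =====

-- B flattens the nested row/col loops into one divmod-decoded loop and replaces the
-- iterative letter encoder by a direct bijective-base-26 recursion (alternative, same cost).


-- ===== PORT A =====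
-- A's while-True loop in _index_to_alpha, with fuel as a totality guard only:
-- for 0 ≤ index the loop performs at most index.toNat + 1 iterations (proved in
-- pvAlphaLoopA_eq below), so the fuel never runs out on any input the loop receives.
def pvAlphaLoopA : Nat → Int → List Char → List Char
  | 0, _, letters => letters
  | fuel + 1, value, letters =>
    let value' := PySem.Int.floordiv value 26
    let remainder := PySem.Int.mod value 26
    let letters' := Char.ofNat (65 + remainder).toNat :: letters
    if value' = 0 then letters' else pvAlphaLoopA fuel (value' - 1) letters'

def index_to_alpha_py (index : Int) : String :=
  String.mk (pvAlphaLoopA (index.toNat + 1) index [])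

def generate_crop_codes_py (images_across : Int) (images_high : Int) (total_parts : Int) : List String :=
  let expected_parts := images_across * images_high
  if total_parts ≠ expected_parts then
    (PySem.List.pyRange 0 total_parts 1).map (fun idx => "P" ++ PySem.Int.toStr (idx + 1))
  else
    (PySem.List.pyRange 0 images_high 1).foldl (fun codes row =>
      let row_label := index_to_alpha_py row
      (PySem.List.pyRange 0 images_across 1).foldl
        (fun codes col => codes ++ [row_label ++ PySem.Int.toStr (col + 1)]) codes) []

-- ===== PORT B =====
-- B's recursive _index_to_alpha; exact for 0 ≤ index, the only calls B makes inside
-- Pre_ (Pre_ excludes the inputs where B's loop produces negative indices).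
def pvAlphaAltRec (n : Nat) : List Char :=
  if n < 26 then [Char.ofNat (65 + n)]
  else pvAlphaAltRec (n / 26 - 1) ++ [Char.ofNat (65 + n % 26)]
  decreasing_by
    have h26 : n / 26 < n := Nat.div_lt_self (by omega) (by omega)
    omega

def index_to_alpha_alt (index : Int) : String :=
  String.mk (pvAlphaAltRec index.toNat)

def generate_crop_codes_py_alt (images_across : Int) (images_high : Int) (total_parts : Int) : List String :=
  if total_parts ≠ images_across * images_high then
    (PySem.List.pyRange 0 total_parts 1).map (fun idx => "P" ++ PySem.Int.toStr (idx + 1))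
  else
    (PySem.List.pyRange 0 total_parts 1).foldl (fun codes idx =>
      let row := PySem.Int.floordiv idx images_across
      let col := PySem.Int.mod idx images_across
      codes ++ [index_to_alpha_alt row ++ PySem.Int.toStr (col + 1)]) []

-- ===== PRECONDITION & SPEC =====
-- Pre_ excludes only the degenerate grids whose two dimensions are both negative while
-- total_parts equals their (positive) product: negative dimensions are meaningless, and
-- both results there are accidents of the implementations (A's empty range(images_high)
-- yields [], B's divmod decoding feeds negative row/col indices to its encoder).
def Pre_generate_crop_codes_py (images_across : Int) (images_high : Int) (total_parts : Int) : Prop :=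
  ¬ (images_across < 0 ∧ images_high < 0 ∧ total_parts = images_across * images_high)
instance (images_across : Int) (images_high : Int) (total_parts : Int) : Decidable (Pre_generate_crop_codes_py images_across images_high total_parts) := by unfold Pre_generate_crop_codes_py; infer_instance

def pvWitness_generate_crop_codes_py : Int × Int × Int := (3, 2, 6)

def Spec_generate_crop_codes_py (images_across : Int) (images_high : Int) (total_parts : Int) (out : List String) : Prop := out = generate_crop_codes_py_alt images_across images_high total_parts
instance (images_across : Int) (images_high : Int) (total_parts : Int) (out : List String) : Decidable (Spec_generate_crop_codes_py images_across images_high total_parts out) := by unfold Spec_generate_crop_codes_py; infer_instance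

-- ===== CLAIM (what is proved, stated in full; the proofs are below) =====
def Claim_equal_generate_crop_codes_py : Prop := ∀ (images_across : Int) (images_high : Int) (total_parts : Int), Dom_generate_crop_codes_py images_across images_high total_parts → Pre_generate_crop_codes_py images_across images_high total_parts → Spec_generate_crop_codes_py images_across images_high total_parts (generate_crop_codes_py images_across images_high total_parts)

-- ===== LEMMAS AND PROOFS =====

-- A's letter loop computes B's recursive encoding, for any sufficient fuel.
theorem pvAlphaLoopA_eq (fuel : Nat) : ∀ (n : Nat) (acc : List Char), n < fuel →
    pvAlphaLoopA fuel (n : Int) acc = pvAlphaAltRec n ++ acc := by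
  induction fuel with
  | zero => omega
  | succ fuel ih =>
    intro n acc hn
    have hq : PySem.Int.floordiv (n : Int) 26 = ((n / 26 : Nat) : Int) := by
      rw [PySem.Int.floordiv_eq_ediv_of_pos (by norm_num)]; omega
    have hr : PySem.Int.mod (n : Int) 26 = ((n % 26 : Nat) : Int) := by
      rw [PySem.Int.mod_eq_emod_of_pos (by norm_num)]; omega
    have hchar : ((65 : Int) + ((n % 26 : Nat) : Int)).toNat = 65 + n % 26 := by omega
    simp only [pvAlphaLoopA, hq, hr, hchar]
    by_cases h26 : n < 26
    · rw [if_pos (show ((n / 26 : Nat) : Int) = 0 by omega), pvAlphaAltRec, if_pos h26,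
        Nat.mod_eq_of_lt h26]
      rfl
    · have hqpos : 0 < n / 26 := Nat.div_pos (by omega) (by omega)
      rw [if_neg (by omega : ¬ ((n / 26 : Nat) : Int) = 0)]
      have hlt : n / 26 - 1 < fuel := by
        have := Nat.div_lt_self (show 0 < n by omega) (show 1 < 26 by omega)
        omega
      rw [show ((n / 26 : Nat) : Int) - 1 = ((n / 26 - 1 : Nat) : Int) by omega,
        ih _ _ hlt]
      conv_rhs => rw [pvAlphaAltRec]
      rw [if_neg h26, List.append_assoc]
      rfl

theorem index_to_alpha_eq (n : Nat) :
    index_to_alpha_py (n : Int) = index_to_alpha_alt (n : Int) := by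
  unfold index_to_alpha_py index_to_alpha_alt
  rw [show ((n : Int)).toNat = n by omega, pvAlphaLoopA_eq (n + 1) n [] (by omega)]
  simp

-- the grid identity: a flat divmod-decoded range equals the nested row/col traversal
theorem range_divmod_flatten {α : Type} (F : Nat → Nat → α) (h w : Nat) :
    (List.range (h * w)).map (fun i => F (i / w) (i % w)) =
      (List.range h).flatMap (fun r => (List.range w).map (fun c => F r c)) := by
  induction h with
  | zero => simp
  | succ h ih =>
    have hmul : (h + 1) * w = h * w + w := by ring
    rw [hmul, List.range_add, List.map_append, ih, List.range_succ, List.flatMap_append]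
    congr 1
    simp only [List.flatMap_cons, List.flatMap_nil, List.append_nil, List.map_map]
    apply List.map_congr_left
    intro c hc
    have hcw : c < w := List.mem_range.mp hc
    have hw : 0 < w := by omega
    have hdiv : (h * w + c) / w = h := by
      rw [Nat.add_comm, Nat.mul_comm, Nat.add_mul_div_left _ _ hw, Nat.div_eq_of_lt hcw]
      omega
    have hmod : (h * w + c) % w = c := by
      rw [Nat.add_comm, Nat.mul_comm, Nat.add_mul_mod_self_left, Nat.mod_eq_of_lt hcw]
    simp [hdiv, hmod]

-- the grid identity specialised to the code strings both ports emit
theorem grid_eq (h w : Nat) :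
    (List.range h).flatMap (fun (r : Nat) =>
        (List.range w).map (fun (c : Nat) => index_to_alpha_py (r : Int) ++ PySem.Int.toStr ((c : Int) + 1))) =
      (List.range (h * w)).map (fun i =>
        index_to_alpha_py ((i / w : Nat) : Int) ++ PySem.Int.toStr (((i % w : Nat) : Int) + 1)) :=
  (range_divmod_flatten (fun r c => index_to_alpha_py (r : Int) ++ PySem.Int.toStr ((c : Int) + 1)) h w).symm

theorem foldl_const {α β : Type} (l : List β) (init : α) :
    l.foldl (fun acc _ => acc) init = init := by
  induction l generalizing init with
  | nil => rfl
  | cons x xs ih => exact ih init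

-- ===== VERDICT (by name: the statement is the Claim_ definition above) =====
theorem generate_crop_codes_py_spec : Claim_equal_generate_crop_codes_py := by
  intro W H T _ hpre
  unfold Spec_generate_crop_codes_py
  simp only [generate_crop_codes_py, generate_crop_codes_py_alt]
  by_cases hT : T = W * H
  · subst hT
    rw [if_neg (fun hc => hc rfl), if_neg (fun hc => hc rfl)]
    by_cases hpos : 0 < W ∧ 0 < H
    · obtain ⟨hW, hH⟩ := hpos
      obtain ⟨w, rfl⟩ : ∃ w : Nat, W = (w : Int) := ⟨W.toNat, by omega⟩
      obtain ⟨h, rfl⟩ : ∃ h : Nat, H = (h : Int) := ⟨H.toNat, by omega⟩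
      rw [show (w : Int) * (h : Int) = ((h * w : Nat) : Int) by push_cast; ring]
      simp only [PySem.List.foldl_append_singleton_eq_map, PySem.List.foldl_append_eq_flatMap,
        List.nil_append, PySem.List.pyRange_zero_natCast, List.map_map, List.flatMap_map,
        Function.comp_def]
      rw [grid_eq]
      apply List.map_congr_left
      intro i _
      rw [PySem.Int.floordiv_natCast, PySem.Int.mod_natCast, index_to_alpha_eq]
    · -- a degenerate grid (some dimension ≤ 0, and not both negative): both sides are []
      have hT0 : W * H ≤ 0 := by
        rcases not_and_or.mp hpos with hW | hH
        · push_neg at hW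
          by_cases hH0 : 0 ≤ H
          · exact mul_nonpos_iff.mpr (Or.inr ⟨hW, hH0⟩)
          · push_neg at hH0
            rcases hW.lt_or_eq with hWneg | hW0
            · exact absurd ⟨hWneg, hH0, rfl⟩ hpre
            · rw [hW0]; simp
        · push_neg at hH
          by_cases hW0 : 0 ≤ W
          · exact mul_nonpos_iff.mpr (Or.inl ⟨hW0, hH⟩)
          · push_neg at hW0
            rcases hH.lt_or_eq with hHneg | hH0
            · exact absurd ⟨hW0, hHneg, rfl⟩ hpre
            · rw [hH0]; simp
      rcases not_and_or.mp hpos with hW | hH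
      · push_neg at hW
        simp only [PySem.List.pyRange_one_eq_nil hW, PySem.List.pyRange_one_eq_nil hT0,
          List.foldl_nil]
        exact foldl_const _ []
      · push_neg at hH
        simp only [PySem.List.pyRange_one_eq_nil hH, PySem.List.pyRange_one_eq_nil hT0,
          List.foldl_nil]
  · rw [if_pos hT, if_pos hT]
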